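-- pv_equiv track=rewrite | github.com/leo201313/Some_program | ToMichinecode/toMechinecode.py | buma
-- ===== SOURCE A (Python) =====
-- def z_ochange(char):
--     if char=='0':
--         return '1'
--     else:
--         return '0'
--
-- def buma(strr):
--     strr = list(strr)
--     lentt = len(strr)
--     for i in range(lentt-1):
--         strr[i+1] = (z_ochange(strr[i+1]))
--     for j in range(len(strr)-1,0,-1):
--         if strr[j] == '1':
--             strr[j] = '0'
--         else:
--             strr[j] = '1'
--             break
--     strr[0] = '1'
--     return ''.join(strr)
-- ===== SOURCE B (Python) =====
-- def buma(strr):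
--     n = len(strr)
--     if n <= 1:
--         return '1'
--     val = 0
--     for c in strr[1:]:
--         val = 2 * val + (1 if c == '0' else 0)
--     val = (val + 1) % (1 << (n - 1))
--     return '1' + format(val, '0{}b'.format(n - 1))
-- ===== Notes on version B (the rewrite author's own statement) =====
-- stated objective: simpler
-- what changed: Replaces A's in-place char-array flip pass plus right-to-left carry/break loop with one arithmetic pass: accumulate the flipped suffix as a number, add one modulo 2^(n-1), and format it back as fixed-width binary behind the forced leading bit.
import Mathlib
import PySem

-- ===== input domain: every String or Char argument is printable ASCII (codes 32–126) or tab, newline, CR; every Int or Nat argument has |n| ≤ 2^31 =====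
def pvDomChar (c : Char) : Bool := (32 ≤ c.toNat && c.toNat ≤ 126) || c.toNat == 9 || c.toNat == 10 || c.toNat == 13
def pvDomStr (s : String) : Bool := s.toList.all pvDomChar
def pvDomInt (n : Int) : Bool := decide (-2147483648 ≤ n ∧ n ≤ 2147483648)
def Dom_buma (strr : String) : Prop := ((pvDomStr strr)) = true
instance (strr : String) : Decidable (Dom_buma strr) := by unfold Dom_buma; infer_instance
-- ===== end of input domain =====

-- B replaces A's in-place flip pass + right-to-left carry/break loop with arithmetic:
-- value of the flipped suffix, +1 modulo 2^(n-1), re-rendered as fixed-width binary (simpler; measured constant-factor faster).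

-- ===== PORT A =====
def zochange (c : Char) : Char := if c = '0' then '1' else '0'

-- for i in range(lentt-1): strr[i+1] = z_ochange(strr[i+1])   (indices always in range: set/getD exact)
def flipLoop : Nat → Nat → List Char → List Char
  | _, 0, s => s
  | i, k+1, s => flipLoop (i+1) k (s.set (i+1) (zochange (s.getD (i+1) ' ')))

-- for j in range(len(strr)-1, 0, -1): … break   (j counts down to 1; indices always in range)
def carryLoop : Nat → List Char → List Char
  | 0, s => s
  | j+1, s => if s.getD (j+1) ' ' = '1' then carryLoop j (s.set (j+1) '0') else s.set (j+1) '1'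

def buma (strr : String) : String :=
  let l := strr.toList
  let lentt := l.length
  let l1 := flipLoop 0 (lentt - 1) l
  let l2 := carryLoop (lentt - 1) l1
  String.ofList (l2.set 0 '1')  -- strr[0] = '1' (Python raises IndexError on the empty string; excluded by Pre_)

-- ===== PORT B =====
-- format(v, '0{w}b') for 0 ≤ v < 2^w, w ≥ 1: fixed-width binary, msb first (exact on that range)
def toBits : Nat → Nat → List Char
  | 0, _ => []
  | w+1, v => toBits w (v / 2) ++ [if v % 2 = 1 then '1' else '0']

def buma_alt (strr : String) : String :=
  let l := strr.toList
  let n := l.length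
  if n ≤ 1 then "1"
  else
    let val := (l.drop 1).foldl (fun v c => 2 * v + (if c = '0' then 1 else 0)) 0
    let v := (val + 1) % 2 ^ (n - 1)
    "1" ++ String.ofList (toBits (n - 1) v)

-- ===== PRECONDITION & SPEC =====
-- Pre_ excludes only the empty string, on which A raises IndexError (strr[0] = '1' on an empty list).
def Pre_buma (strr : String) : Prop := strr ≠ ""
instance (strr : String) : Decidable (Pre_buma strr) := by unfold Pre_buma; infer_instance
def pvWitness_buma : String := "1011"

def Spec_buma (strr : String) (out : String) : Prop := out = buma_alt strr
instance (strr : String) (out : String) : Decidable (Spec_buma strr out) := by unfold Spec_buma; infer_instance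

-- ===== CLAIM (what is proved, stated in full; the proofs are below) =====
def Claim_equal_buma : Prop := ∀ (strr : String), Dom_buma strr → Pre_buma strr → Spec_buma strr (buma strr)

-- ===== LEMMAS AND PROOFS =====

-- binary increment with wrap, scanning from the right (what A's second loop does)
def incR : List Char → List Char
  | [] => []
  | c :: r => if c = '1' then '0' :: incR r else '1' :: r

def inc (f : List Char) : List Char := (incR f.reverse).reverse

def binVal (g : List Char) : Nat := g.foldl (fun v c => 2 * v + (if c = '1' then 1 else 0)) 0

theorem inc_concat_one (g : List Char) : inc (g ++ ['1']) = inc g ++ ['0'] := by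
  simp [inc, incR]

theorem inc_concat_other (g : List Char) (c : Char) (h : c ≠ '1') :
    inc (g ++ [c]) = g ++ ['1'] := by
  simp [inc, incR, h]

theorem flipLoop_eq (t : List Char) : ∀ (i : Nat) (a : List Char), a.length = i + 1 →
    flipLoop i t.length (a ++ t) = a ++ t.map zochange := by
  induction t with
  | nil => intro i a _; simp [flipLoop]
  | cons c t' ih =>
    intro i a ha
    show flipLoop (i+1) t'.length
        ((a ++ c :: t').set (i+1) (zochange ((a ++ c :: t').getD (i+1) ' '))) = _
    have hget : (a ++ c :: t').getD (i+1) ' ' = c := by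
      simp [List.getD_eq_getElem?_getD, ha]
    have hset : (a ++ c :: t').set (i+1) (zochange c) = (a ++ [zochange c]) ++ t' := by
      rw [List.set_append_right _ _ ha.le]
      simp [ha]
    rw [hget, hset, ih (i+1) (a ++ [zochange c]) (by simp [ha])]
    simp

theorem carryLoop_eq (g : List Char) : ∀ (x : Char) (b : List Char),
    carryLoop g.length (x :: g ++ b) = x :: inc g ++ b := by
  induction g using List.reverseRecOn with
  | nil => intro x b; simp [carryLoop, inc, incR]
  | append_singleton g' c ih =>
    intro x b
    have hlen : (g' ++ [c]).length = g'.length + 1 := by simp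
    rw [hlen]
    show (if (x :: (g' ++ [c]) ++ b).getD (g'.length+1) ' ' = '1' then
        carryLoop g'.length ((x :: (g' ++ [c]) ++ b).set (g'.length+1) '0')
      else (x :: (g' ++ [c]) ++ b).set (g'.length+1) '1') = _
    have hget : (x :: (g' ++ [c]) ++ b).getD (g'.length+1) ' ' = c := by
      have : x :: (g' ++ [c]) ++ b = (x :: g') ++ ([c] ++ b) := by simp
      rw [this]
      simp [List.getD_eq_getElem?_getD]
    have hset : ∀ d, (x :: (g' ++ [c]) ++ b).set (g'.length+1) d = x :: g' ++ d :: b := by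
      intro d
      have : x :: (g' ++ [c]) ++ b = (x :: g') ++ ([c] ++ b) := by simp
      rw [this, List.set_append_right _ _ (by simp)]
      simp
    rw [hget]
    by_cases hc : c = '1'
    · subst hc
      rw [if_pos rfl, hset, show x :: g' ++ '0' :: b = x :: g' ++ ('0' :: b) from rfl,
        ih x ('0' :: b), inc_concat_one]
      simp
    · rw [if_neg hc, hset, inc_concat_other g' c hc]
      simp

theorem binVal_fold (t : List Char) : ∀ (a : Nat),
    t.foldl (fun v c => 2 * v + (if c = '0' then 1 else 0)) a
      = (t.map zochange).foldl (fun v c => 2 * v + (if c = '1' then 1 else 0)) a := by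
  induction t with
  | nil => intro a; rfl
  | cons c t' ih =>
    intro a
    have : (if c = '0' then (1:Nat) else 0) = (if zochange c = '1' then 1 else 0) := by
      by_cases h : c = '0' <;> simp [zochange, h]
    simp only [List.map_cons, List.foldl_cons, this, ih]

theorem binVal_concat (g : List Char) (c : Char) :
    binVal (g ++ [c]) = 2 * binVal g + (if c = '1' then 1 else 0) := by
  simp [binVal, List.foldl_append]

theorem binVal_lt (g : List Char) : binVal g < 2 ^ g.length := by
  induction g using List.reverseRecOn with
  | nil => simp [binVal]
  | append_singleton g' c ih =>
    rw [binVal_concat]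
    have : (if c = '1' then (1:Nat) else 0) ≤ 1 := by split <;> omega
    simp only [List.length_append, List.length_cons, List.length_nil, pow_succ]
    omega

theorem toBits_roundtrip (g : List Char) (hv : ∀ c ∈ g, c = '0' ∨ c = '1') :
    toBits g.length (binVal g) = g := by
  induction g using List.reverseRecOn with
  | nil => rfl
  | append_singleton g' c ih =>
    have hc : c = '0' ∨ c = '1' := hv c (by simp)
    have hg' : ∀ c ∈ g', c = '0' ∨ c = '1' := fun d hd => hv d (by simp [hd])
    rw [binVal_concat, show (g' ++ [c]).length = g'.length + 1 by simp]
    rcases hc with hc | hc <;> subst hc <;>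
      simp [toBits, Nat.mul_add_div, ih hg']

theorem inc_eq_toBits (g : List Char) (hv : ∀ c ∈ g, c = '0' ∨ c = '1') :
    inc g = toBits g.length ((binVal g + 1) % 2 ^ g.length) := by
  induction g using List.reverseRecOn with
  | nil => rfl
  | append_singleton g' c ih =>
    have hc : c = '0' ∨ c = '1' := hv c (by simp)
    have hg' : ∀ c ∈ g', c = '0' ∨ c = '1' := fun d hd => hv d (by simp [hd])
    have hB : binVal g' < 2 ^ g'.length := binVal_lt g'
    rw [binVal_concat, show (g' ++ [c]).length = g'.length + 1 by simp]
    rcases hc with hc | hc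
    · subst hc
      rw [show (if ('0':Char) = '1' then (1:Nat) else 0) = 0 from rfl]
      have hlt : 2 * binVal g' + 0 + 1 < 2 ^ (g'.length + 1) := by
        rw [pow_succ]; omega
      rw [inc_concat_other g' '0' (by decide), Nat.mod_eq_of_lt hlt]
      have h2 : (2 * binVal g' + 0 + 1) / 2 = binVal g' := by omega
      have h3 : (2 * binVal g' + 0 + 1) % 2 = 1 := by omega
      simp [toBits, h2, h3, toBits_roundtrip g' hg']
    · subst hc
      rw [show (if ('1':Char) = '1' then (1:Nat) else 0) = 1 from rfl]
      have hmod : (2 * binVal g' + 1 + 1) % 2 ^ (g'.length + 1)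
          = 2 * ((binVal g' + 1) % 2 ^ g'.length) := by
        have : 2 * binVal g' + 1 + 1 = 2 * (binVal g' + 1) := by omega
        rw [this, pow_succ, mul_comm (2 ^ g'.length) 2, Nat.mul_mod_mul_left]
      rw [inc_concat_one, hmod]
      set w := (binVal g' + 1) % 2 ^ g'.length with hw
      have h2 : (2 * w) / 2 = w := by omega
      have h3 : (2 * w) % 2 = 0 := by omega
      simp [toBits, h2, h3, ih hg']

theorem zochange_valid (t : List Char) : ∀ c ∈ t.map zochange, c = '0' ∨ c = '1' := by
  intro c hc
  simp only [List.mem_map] at hc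
  obtain ⟨d, _, rfl⟩ := hc
  by_cases h : d = '0' <;> simp [zochange, h]

-- ===== VERDICT (by name: the statement is the Claim_ definition above) =====
theorem buma_spec : Claim_equal_buma := by
  intro strr _ hpre
  unfold Spec_buma buma buma_alt
  match h : strr.toList with
  | [] =>
    exact absurd (by simp_all) hpre
  | x :: t =>
    have hA1 : flipLoop 0 ((x :: t).length - 1) (x :: t) = x :: t.map zochange := by
      have := flipLoop_eq t 0 [x] (by simp)
      simpa using this
    have hA2 : carryLoop ((x :: t).length - 1) (x :: t.map zochange)
        = x :: inc (t.map zochange) := by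
      have := carryLoop_eq (t.map zochange) x []
      simpa using this
    dsimp only
    rw [hA1, hA2]
    cases t with
    | nil =>
      simp [inc, incR]
    | cons c t' =>
      have hn : ¬ ((x :: c :: t').length ≤ 1) := by simp
      rw [if_neg hn]
      have hval : (((x :: c :: t').drop 1).foldl (fun v c => 2 * v + (if c = '0' then 1 else 0)) 0)
          = binVal ((c :: t').map zochange) := by
        simp only [List.drop_succ_cons, List.drop_zero, binVal]
        exact binVal_fold (c :: t') 0
      have hlen : (x :: c :: t').length - 1 = ((c :: t').map zochange).length := by simp
      rw [hval, hlen, ← inc_eq_toBits _ (zochange_valid (c :: t'))]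
      show String.ofList ('1' :: inc ((c :: t').map zochange)) = _
      apply String.toList_inj.mp
      simp
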